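-- pv_equiv track=rewrite | github.com/abhuva/email-agent | src/error_handling.py | format_error_summary
-- ===== SOURCE A (Python) =====
-- from typing import Optional, Dict, Any, Callable
--
-- class ErrorCode:
--     """Standard error codes for different error categories."""
--     # Configuration errors (1xxx)
--     CONFIG_MISSING = "E1001"
--     CONFIG_INVALID = "E1002"
--     CONFIG_PATH_INVALID = "E1003"
--
--     # IMAP errors (2xxx)
--     IMAP_CONNECTION_FAILED = "E2001"
--     IMAP_AUTH_FAILED = "E2002"
--     IMAP_FETCH_FAILED = "E2003"
--     IMAP_TAG_FAILED = "E2004"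
--
--     # API errors (3xxx)
--     API_REQUEST_FAILED = "E3001"
--     API_RATE_LIMIT = "E3002"
--     API_TIMEOUT = "E3003"
--     API_INVALID_RESPONSE = "E3004"
--
--     # File system errors (4xxx)
--     FILE_READ_FAILED = "E4001"
--     FILE_WRITE_FAILED = "E4002"
--     FILE_PERMISSION_DENIED = "E4003"
--     FILE_PATH_INVALID = "E4004"
--
--     # Processing errors (5xxx)
--     EMAIL_PROCESSING_FAILED = "E5001"
--     NOTE_CREATION_FAILED = "E5002"
--     SUMMARY_GENERATION_FAILED = "E5003"
--     CHANGELOG_UPDATE_FAILED = "E5004"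
--
--     # Unknown errors (9xxx)
--     UNKNOWN_ERROR = "E9001"
--
-- def format_error_summary(errors: list[Dict[str, Any]]) -> str:
--     """
--     Format a summary of errors for display.
--
--     Args:
--         errors: List of error dictionaries with 'code', 'message', 'context' keys
--
--     Returns:
--         Formatted error summary string
--     """
--     if not errors:
--         return "No errors occurred."
--
--     summary_lines = [f"Total errors: {len(errors)}"]
--
--     # Group errors by code
--     error_counts = {}
--     for error in errors:
--         code = error.get('code', ErrorCode.UNKNOWN_ERROR)
--         error_counts[code] = error_counts.get(code, 0) + 1
--
--     summary_lines.append("\nError breakdown:")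
--     for code, count in sorted(error_counts.items()):
--         summary_lines.append(f"  {code}: {count}")
--
--     return "\n".join(summary_lines)
-- ===== SOURCE B (Python) =====
-- from itertools import groupby
--
-- _UNKNOWN_ERROR = "E9001"  # ErrorCode.UNKNOWN_ERROR
--
-- def format_error_summary(errors):
--     if not errors:
--         return "No errors occurred."
--     codes = [e.get('code', _UNKNOWN_ERROR) for e in errors]
--     codes.sort()
--     lines = [f"Total errors: {len(errors)}", "\nError breakdown:"]
--     for code, group in groupby(codes):
--         lines.append(f"  {code}: {sum(1 for _ in group)}")
--     return "\n".join(lines)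
-- ===== Notes on version B (the rewrite author's own statement) =====
-- stated objective: alternative
-- what changed: Replaces A's dict-of-counts built per element and then sorted by items with B's sort-the-code-list-first and a single groupby pass over adjacent runs that emits each distinct code with its run length, already in order.
import Mathlib
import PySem

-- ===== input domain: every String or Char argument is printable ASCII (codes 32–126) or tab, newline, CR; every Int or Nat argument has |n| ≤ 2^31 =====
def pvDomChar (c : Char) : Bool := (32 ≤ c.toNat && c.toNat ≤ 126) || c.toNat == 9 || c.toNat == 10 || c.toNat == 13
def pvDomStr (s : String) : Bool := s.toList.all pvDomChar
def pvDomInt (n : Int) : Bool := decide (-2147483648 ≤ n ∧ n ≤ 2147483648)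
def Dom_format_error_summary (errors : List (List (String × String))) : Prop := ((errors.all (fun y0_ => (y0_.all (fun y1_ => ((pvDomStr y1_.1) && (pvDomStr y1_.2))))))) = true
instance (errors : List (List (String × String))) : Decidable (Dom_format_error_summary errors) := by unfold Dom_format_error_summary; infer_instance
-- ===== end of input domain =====

-- B replaces A's dict-count-then-sort-items with sort-the-codes-then-groupby-adjacent-runs (alternative decomposition, same cost).

-- error.get('code', ErrorCode.UNKNOWN_ERROR)  — shared accessor (ErrorCode.UNKNOWN_ERROR = "E9001")
def pvGetCode (error : List (String × String)) : String :=
  (PySem.Dict.mk error).getD "code" "E9001"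

-- ===== PORT A =====
def format_error_summary (errors : List (List (String × String))) : String :=
  if errors = [] then "No errors occurred."
  else
    let summary_lines : List String := ["Total errors: " ++ PySem.Int.toStr (PySem.List.len errors)]
    -- error_counts[code] = error_counts.get(code, 0) + 1  (PySem.Dict.modify)
    let error_counts : PySem.Dict String Int :=
      errors.foldl (fun d error => d.modify (pvGetCode error) 0 (· + 1)) PySem.Dict.empty
    let summary_lines := summary_lines ++ ["\nError breakdown:"]
    -- for code, count in sorted(error_counts.items()):  (tuple order ⇒ sorted2)
    let summary_lines := summary_lines ++
      (PySem.List.sorted2 error_counts.items Prod.fst Prod.snd).map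
        (fun p => "  " ++ p.1 ++ ": " ++ PySem.Int.toStr p.2)
    PySem.Str.join "\n" summary_lines

-- ===== PORT B =====
-- itertools.groupby over a sorted list: emit (run head, run length) for each maximal adjacent run
def pvGroups : List String → List (String × Int)
  | [] => []
  | c :: rest =>
    (c, ((rest.takeWhile (fun y => y == c)).length : Int) + 1) ::
      pvGroups (rest.dropWhile (fun y => y == c))
termination_by l => l.length
decreasing_by
  exact Nat.lt_succ_of_le (List.length_dropWhile_le _ _)

def format_error_summary_alt (errors : List (List (String × String))) : String :=
  if errors = [] then "No errors occurred."
  else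
    let codes := errors.map pvGetCode
    let codes := PySem.List.sorted codes (fun c => c)   -- codes.sort()
    let lines : List String := ["Total errors: " ++ PySem.Int.toStr (PySem.List.len errors), "\nError breakdown:"]
    let lines := lines ++
      (pvGroups codes).map (fun p => "  " ++ p.1 ++ ": " ++ PySem.Int.toStr p.2)
    PySem.Str.join "\n" lines

-- ===== PRECONDITION & SPEC =====
def Spec_format_error_summary (errors : List (List (String × String))) (out : String) : Prop := out = format_error_summary_alt errors
instance (errors : List (List (String × String))) (out : String) : Decidable (Spec_format_error_summary errors out) := by unfold Spec_format_error_summary; infer_instance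

-- ===== CLAIM (what is proved, stated in full; the proofs are below) =====
def Claim_equal_format_error_summary : Prop := ∀ (errors : List (List (String × String))), Dom_format_error_summary errors → Spec_format_error_summary errors (format_error_summary errors)

-- ===== LEMMAS AND PROOFS =====

lemma lt_of_mem_dropWhile_eq (c : String) (rest : List String)
    (hs : rest.Pairwise (· ≤ ·)) (hc : ∀ x ∈ rest, c ≤ x) :
    ∀ x ∈ rest.dropWhile (fun y => y == c), c < x := by
  induction rest with
  | nil => simp
  | cons y t ih =>
    by_cases hy : y = c
    · subst hy
      rw [List.dropWhile_cons_of_pos (by simp)]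
      exact ih hs.tail (fun x hx => hc x (by simp [hx]))
    · rw [List.dropWhile_cons_of_neg (by simp [hy])]
      intro x hx
      rcases List.mem_cons.mp hx with rfl | hx
      · exact lt_of_le_of_ne (hc x (by simp)) (fun he => hy he.symm)
      · have h1 : c < y := lt_of_le_of_ne (hc y (by simp)) (fun he => hy he.symm)
        exact lt_of_lt_of_le h1 (List.rel_of_pairwise_cons hs hx)

lemma count_sorted_head (c : String) (rest : List String)
    (hs : (c :: rest).Pairwise (· ≤ ·)) :
    ((c :: rest).count c : Int) = ((rest.takeWhile (fun y => y == c)).length : Int) + 1 := by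
  have hdrop : List.count c (rest.dropWhile (fun y => y == c)) = 0 := by
    rw [List.count_eq_zero]
    intro hmem
    exact absurd rfl (ne_of_gt (lt_of_mem_dropWhile_eq c rest hs.tail
      (fun x hx => List.rel_of_pairwise_cons hs hx) c hmem))
  have htake : List.count c (rest.takeWhile (fun y => y == c)) = (rest.takeWhile (fun y => y == c)).length := by
    rw [List.count_eq_length]
    intro b hb
    have hb' := List.mem_takeWhile_imp hb
    simp only [beq_iff_eq] at hb'
    exact hb'.symm
  have : List.count c rest = (rest.takeWhile (fun y => y == c)).length := by
    conv_lhs => rw [← List.takeWhile_append_dropWhile (p := fun y => y == c) (l := rest)]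
    rw [List.count_append, htake, hdrop, Nat.add_zero]
  simp [this]


lemma count_drop_of_ne (c x : String) (rest : List String) (hx : x ≠ c) :
    List.count x (rest.dropWhile (fun y => y == c)) = List.count x (c :: rest) := by
  have htake : List.count x (rest.takeWhile (fun y => y == c)) = 0 := by
    rw [List.count_eq_zero]
    intro hmem'
    have h' := List.mem_takeWhile_imp hmem'
    simp only [beq_iff_eq] at h'
    exact hx h'
  have hrest : List.count x rest
      = List.count x (rest.takeWhile (fun y => y == c)) + List.count x (rest.dropWhile (fun y => y == c)) := by
    conv_lhs => rw [← List.takeWhile_append_dropWhile (p := fun y => y == c) (l := rest)]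
    rw [List.count_append]
  rw [List.count_cons, hrest, htake]
  rw [if_neg (by simpa using fun h : c = x => hx h.symm : ¬((c == x) = true)), Nat.zero_add, Nat.add_zero]

lemma mem_pvGroups_iff (S : List String) (hs : S.Pairwise (· ≤ ·)) (p : String × Int) :
    p ∈ pvGroups S ↔ p.1 ∈ S ∧ p.2 = (S.count p.1 : Int) := by
  induction S using pvGroups.induct with
  | case1 => simp [pvGroups]
  | case2 c rest ih =>
    have hsub : (rest.dropWhile (fun y => y == c)).Pairwise (· ≤ ·) :=
      hs.tail.sublist (List.dropWhile_sublist _)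
    rw [pvGroups]
    simp only [List.mem_cons]
    constructor
    · rintro (rfl | hmem)
      · exact ⟨by simp, (count_sorted_head c rest hs).symm⟩
      · obtain ⟨h1, h2⟩ := (ih hsub).mp hmem
        have hlt : c < p.1 := lt_of_mem_dropWhile_eq c rest hs.tail
          (fun x hx => List.rel_of_pairwise_cons hs hx) p.1 h1
        refine ⟨Or.inr ((List.dropWhile_sublist _).mem h1), ?_⟩
        rw [h2]
        exact congrArg _ (count_drop_of_ne c p.1 rest (ne_of_gt hlt))
    · rintro ⟨h1, h2⟩
      by_cases hc : p.1 = c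
      · left
        have : p.2 = ((rest.takeWhile (fun y => y == c)).length : Int) + 1 := by
          rw [h2, hc, count_sorted_head c rest hs]
        exact Prod.ext hc this
      · right
        apply (ih hsub).mpr
        have hmem : p.1 ∈ rest := by
          rcases h1 with h | h
          · exact absurd h hc
          · exact h
        have hdropmem : p.1 ∈ rest.dropWhile (fun y => y == c) := by
          rcases (List.mem_append.mp (by rw [List.takeWhile_append_dropWhile]; exact hmem :
              p.1 ∈ rest.takeWhile (fun y => y == c) ++ rest.dropWhile (fun y => y == c))) with h | h
          · have h' := List.mem_takeWhile_imp h
            simp only [beq_iff_eq] at h'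
            exact absurd h' hc
          · exact h
        refine ⟨hdropmem, ?_⟩
        rw [h2]
        exact (congrArg _ (count_drop_of_ne c p.1 rest hc)).symm

lemma pairwise_pvGroups (S : List String) (hs : S.Pairwise (· ≤ ·)) :
    (pvGroups S).Pairwise (fun a b => a.1 < b.1) := by
  induction S using pvGroups.induct with
  | case1 => simp [pvGroups]
  | case2 c rest ih =>
    have hsub : (rest.dropWhile (fun y => y == c)).Pairwise (· ≤ ·) :=
      hs.tail.sublist (List.dropWhile_sublist _)
    rw [pvGroups]
    refine List.Pairwise.cons ?_ (ih hsub)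
    intro p hp
    have h1 := ((mem_pvGroups_iff _ hsub p).mp hp).1
    exact lt_of_mem_dropWhile_eq c rest hs.tail (fun x hx => List.rel_of_pairwise_cons hs hx) p.1 h1

-- insertBy only looks at `before x ·` on the current list
lemma insertBy_congr {α : Type} (b1 b2 : α → α → Bool) (x : α) (ys : List α)
    (h : ∀ y ∈ ys, b1 x y = b2 x y) :
    PySem.List.insertBy b1 x ys = PySem.List.insertBy b2 x ys := by
  induction ys with
  | nil => rfl
  | cons y ys ih =>
    simp only [PySem.List.insertBy, h y (by simp)]
    split
    · rfl
    · rw [ih (fun z hz => h z (by simp [hz]))]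

lemma insertBy_perm {α : Type} (b : α → α → Bool) (x : α) (ys : List α) :
    (PySem.List.insertBy b x ys).Perm (x :: ys) := by
  induction ys with
  | nil => rfl
  | cons y ys ih =>
    simp only [PySem.List.insertBy]
    split
    · rfl
    · exact (ih.cons y).trans (List.Perm.swap x y ys)

-- on a list with pairwise-distinct k1-keys, lexicographic (k1,k2)-insertion = k1-insertion
lemma foldl_insertBy_key {α κ₁ κ₂ : Type} [LinearOrder κ₁] [LT κ₂] [DecidableLT κ₂]
    (k1 : α → κ₁) (k2 : α → κ₂) (l acc : List α)
    (h : ((acc ++ l).map k1).Nodup) :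
    List.foldl (fun a x => PySem.List.insertBy
        (fun a b => decide (k1 a < k1 b) || (!decide (k1 b < k1 a) && decide (k2 a < k2 b))) x a) acc l
    = List.foldl (fun a x => PySem.List.insertBy (fun a b => decide (k1 a < k1 b)) x a) acc l := by
  induction l generalizing acc with
  | nil => rfl
  | cons x t ih =>
    have hx : ∀ y ∈ acc, k1 x ≠ k1 y := by
      intro y hy
      have := h
      simp only [List.map_append, List.nodup_append] at this
      have hne := this.2.2 (k1 y) (List.mem_map_of_mem hy) (k1 x) (by simp)
      exact fun he => hne (by rw [he])
    have hcong : PySem.List.insertBy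
        (fun a b => decide (k1 a < k1 b) || (!decide (k1 b < k1 a) && decide (k2 a < k2 b))) x acc
        = PySem.List.insertBy (fun a b => decide (k1 a < k1 b)) x acc := by
      apply insertBy_congr
      intro y hy
      have hne := hx y hy
      by_cases h1 : k1 x < k1 y
      · simp [h1]
      · have h2 : k1 y < k1 x := lt_of_le_of_ne (not_lt.mp h1) (fun he => hne he.symm)
        simp [h1, h2]
    simp only [List.foldl_cons, hcong]
    apply ih
    have hperm : ((PySem.List.insertBy (fun a b => decide (k1 a < k1 b)) x acc) ++ t).Perm ((acc ++ x :: t)) := by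
      refine List.Perm.append ((insertBy_perm _ x acc)) (List.Perm.refl t) |>.trans ?_
      exact (List.perm_middle).symm
    exact ((hperm.map k1).nodup_iff).mpr h

lemma sorted2_eq_sorted_of_nodup_keys {α κ₁ κ₂ : Type} [LinearOrder κ₁] [LT κ₂] [DecidableLT κ₂]
    (l : List α) (k1 : α → κ₁) (k2 : α → κ₂) (h : (l.map k1).Nodup) :
    PySem.List.sorted2 l k1 k2 = PySem.List.sorted l k1 := by
  rw [PySem.List.sorted_eq_foldl_insertBy]
  simp only [PySem.List.sorted2]
  exact foldl_insertBy_key k1 k2 l [] (by simpa using h)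



lemma pvGroups_eq_sorted2_items (codes : List String) :
    PySem.List.sorted2 (PySem.Dict.counter codes).items Prod.fst Prod.snd
      = pvGroups (PySem.List.sorted codes (fun c => c)) := by
  set S := PySem.List.sorted codes (fun c => c) with hS
  have hsS : S.Pairwise (· ≤ ·) := by
    have := PySem.List.sorted_pairwise codes (fun c => c)
    simpa using this
  have hitems := PySem.Dict.items_counter codes
  have hinj : Function.Injective (fun k : String => (k, (codes.count k : Int))) := by
    intro a b h
    exact congrArg Prod.fst h
  have hnodupR : ((PySem.Set.ofList codes).map (fun k => (k, (codes.count k : Int)))).Nodup :=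
    (PySem.Set.nodup_ofList codes).map hinj
  have hpairG : (pvGroups S).Pairwise (fun a b => a.1 < b.1) := pairwise_pvGroups S hsS
  have hnodupG : (pvGroups S).Nodup := hpairG.imp (fun h => by
    intro he; rw [he] at h; exact lt_irrefl _ h)
  have hperm : (pvGroups S).Perm ((PySem.Set.ofList codes).map (fun k => (k, (codes.count k : Int)))) := by
    rw [List.perm_ext_iff_of_nodup hnodupG hnodupR]
    intro p
    rw [mem_pvGroups_iff S hsS p, List.mem_map]
    constructor
    · rintro ⟨h1, h2⟩
      refine ⟨p.1, ?_, ?_⟩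
      · rw [PySem.Set.mem_ofList]
        exact (PySem.List.mem_sorted codes (fun c => c) false p.1).mp h1
      · have hcnt : S.count p.1 = codes.count p.1 :=
          (PySem.List.sorted_perm codes (fun c => c) false).count_eq p.1
        rw [← hcnt, ← h2]
    · rintro ⟨k, hk, rfl⟩
      rw [PySem.Set.mem_ofList] at hk
      constructor
      · exact (PySem.List.mem_sorted codes (fun c => c) false k).mpr hk
      · have hcnt : S.count k = codes.count k :=
          (PySem.List.sorted_perm codes (fun c => c) false).count_eq k
        rw [hcnt]
    
  rw [hitems]
  rw [sorted2_eq_sorted_of_nodup_keys _ Prod.fst Prod.snd (by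
    rw [List.map_map]
    have hid : (Prod.fst ∘ fun k : String => (k, (codes.count k : Int))) = id := rfl
    rw [hid, List.map_id]
    exact PySem.Set.nodup_ofList codes)]
  exact PySem.List.sorted_eq_of_perm_of_pairwise_lt _ _ Prod.fst hperm hpairG


lemma pvKey_eq (errors : List (List (String × String))) :
    PySem.List.sorted2
      (errors.foldl (fun d error => d.modify (pvGetCode error) 0 (· + 1)) PySem.Dict.empty).items
      Prod.fst Prod.snd
    = pvGroups (PySem.List.sorted (errors.map pvGetCode) (fun c => c)) := by
  rw [← pvGroups_eq_sorted2_items (errors.map pvGetCode)]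
  rw [PySem.Dict.counter_eq_foldl, List.foldl_map]

-- ===== VERDICT (by name: the statement is the Claim_ definition above) =====
theorem format_error_summary_spec : Claim_equal_format_error_summary := by
  intro errors _
  unfold Spec_format_error_summary format_error_summary format_error_summary_alt
  by_cases h : errors = []
  · simp [h]
  · simp only [if_neg h]
    rw [pvKey_eq]
    rfl
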